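-- pv_equiv track=rewrite | github.com/RootSquirrels/FinOps-Toolset | finops_dashboard.py | _signals_to_dict
-- ===== SOURCE A (Python) =====
-- def _signals_to_dict(sig: str) -> dict:
--     """
--     Convert the Signals cell to a dict.
--     Accepts strings like "k=v\nk2=v2" OR "k=v; k2=v2" OR arbitrary.
--     """
--     out = {}
--     if not sig:
--         return out
--     # Split by line breaks first; then by ';'
--     parts = []
--     for line in str(sig).splitlines():
--         line = line.strip()
--         if not line:
--             continue
--         # If line contains multiple pairs separated by ';'
--         if ';' in line and '=' in line:
--             parts += [p.strip() for p in line.split(';') if p.strip()]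
--         else:
--             parts.append(line)
--     # Parse k=v
--     for p in parts:
--         if '=' in p:
--             k,v = p.split('=', 1)
--             out[str(k).strip()] = str(v).strip()
--     return out
-- ===== SOURCE B (Python) =====
-- def _signals_to_dict(sig: str) -> dict:
--     """
--     Convert the Signals cell to a dict.
--     Single fused pass: split each line on ';' unconditionally and parse
--     every piece containing '='; pieces without '=' contribute nothing.
--     """
--     out = {}
--     for line in str(sig).splitlines():
--         for piece in line.split(';'):
--             if '=' in piece:
--                 k, v = piece.split('=', 1)
--                 out[k.strip()] = v.strip()
--     return out
-- ===== Notes on version B (the rewrite author's own statement) =====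
-- stated objective: simpler
-- what changed: Replaces A's two-phase pass (build an intermediate 'parts' list with a conditional ';'-split plus strip/filter, then parse it) with one fused nested pass that splits every line on ';' unconditionally and parses each '='-containing piece straight into the dict.
import Mathlib
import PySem

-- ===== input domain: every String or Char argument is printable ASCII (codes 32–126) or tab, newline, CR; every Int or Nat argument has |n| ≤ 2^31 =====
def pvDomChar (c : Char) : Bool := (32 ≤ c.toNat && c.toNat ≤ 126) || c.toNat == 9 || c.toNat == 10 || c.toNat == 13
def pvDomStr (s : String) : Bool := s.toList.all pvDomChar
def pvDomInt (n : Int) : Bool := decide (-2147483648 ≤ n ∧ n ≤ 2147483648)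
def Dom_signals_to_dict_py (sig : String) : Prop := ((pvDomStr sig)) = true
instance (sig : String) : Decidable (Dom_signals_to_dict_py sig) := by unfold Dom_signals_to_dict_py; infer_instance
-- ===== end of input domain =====

-- B replaces A's two-phase pass (intermediate `parts` list with a conditional ';'-split) with one
-- fused nested pass that splits every line on ';' unconditionally; objective: simpler.

-- shared helper: the literal "if '=' in p: k, v = p.split('=', 1); out[k.strip()] = v.strip()"
-- snippet, which appears verbatim in both Pythons
def parseKV (d : PySem.Dict String String) (p : String) : PySem.Dict String String :=
  if PySem.Str.isIn "=" p then
    match PySem.Str.splitMax? p "=" 1 with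
    | some (k :: v :: _) => d.insert (PySem.Str.strip k) (PySem.Str.strip v)
    | _ => d
  else d

-- ===== PORT A =====
-- `line.split(';')` (non-empty separator) is ported exactly as PySem.Chars.splitOn on the
-- character list, mapped back to String.
def signals_to_dict_py (sig : String) : List (String × String) :=
  if sig = "" then [] else
  let parts : List String :=
    (PySem.Str.splitlines sig).foldl (fun parts line =>
      let line := PySem.Str.strip line
      if line = "" then parts
      else if PySem.Str.isIn ";" line && PySem.Str.isIn "=" line then
        parts ++ ((((PySem.Chars.splitOn line.toList [';']).map String.ofList).filter
                    (fun p => PySem.Str.strip p ≠ "")).map PySem.Str.strip)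
      else parts ++ [line]) []
  (parts.foldl parseKV PySem.Dict.empty).items

-- ===== PORT B =====
def signals_to_dict_py_alt (sig : String) : List (String × String) :=
  ((PySem.Str.splitlines sig).foldl (fun out line =>
      ((PySem.Chars.splitOn line.toList [';']).map String.ofList).foldl parseKV out)
    PySem.Dict.empty).items

-- ===== PRECONDITION & SPEC =====
def Spec_signals_to_dict_py (sig : String) (out : List (String × String)) : Prop := out = signals_to_dict_py_alt sig
instance (sig : String) (out : List (String × String)) : Decidable (Spec_signals_to_dict_py sig out) := by unfold Spec_signals_to_dict_py; infer_instance

-- ===== CLAIM (what is proved, stated in full; the proofs are below) =====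
def Claim_equal_signals_to_dict_py : Prop := ∀ (sig : String), Dom_signals_to_dict_py sig → Spec_signals_to_dict_py sig (signals_to_dict_py sig)


-- ===== LEMMAS AND PROOFS =====

-- proof-side vocabulary ------------------------------------------------------
def wsAll (w : List Char) : Prop := ∀ a ∈ w, PySem.Chars.isspace a = true

-- simple reference splitter on one character
def splitC (c : Char) : List Char → List (List Char)
  | [] => [[]]
  | a :: t => if a = c then [] :: splitC c t else (splitC c t).modifyHead (a :: ·)

-- last-element modifier (explicit recursion; List.modifyLast's .go form is awkward to reason about)
def mLast {α : Type} (g : α → α) : List α → List α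
  | [] => []
  | [x] => [g x]
  | x :: y :: t => x :: mLast g (y :: t)

-- parseKV at the character-list level
def pkv (d : PySem.Dict String String) (p : List Char) : PySem.Dict String String :=
  parseKV d (String.ofList p)

lemma infix_singleton {a : Char} {l : List Char} : [a] <:+: l ↔ a ∈ l := by
  constructor
  · intro h; exact h.subset (List.mem_singleton_self a)
  · intro h; obtain ⟨s, t, rfl⟩ := List.append_of_mem h
    exact ⟨s, t, by simp⟩

lemma isIn_single {a : Char} {l : List Char} :
    PySem.Chars.isIn [a] l = true ↔ a ∈ l := by
  rw [PySem.Chars.isIn_iff_infix, infix_singleton]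

lemma isIn_single_false {a : Char} {l : List Char} :
    PySem.Chars.isIn [a] l = false ↔ a ∉ l := by
  rw [PySem.Chars.isIn_eq_false_iff, infix_singleton]

lemma splitC_ne_nil (c : Char) (l : List Char) : splitC c l ≠ [] := by
  cases l with
  | nil => simp [splitC]
  | cons a t =>
    simp only [splitC]
    split
    · simp
    · cases h : splitC c t with
      | nil => exact absurd h (splitC_ne_nil c t)
      | cons x xs => simp [List.modifyHead]

lemma splitOn_go_eq (c : Char) :
    ∀ (l : List Char) (fuel : Nat) (cur : List Char) (acc : List (List Char)),
      l.length < fuel →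
      PySem.Chars.splitOn.go [c] fuel l cur acc =
        acc.reverse ++ (splitC c l).modifyHead (cur.reverse ++ ·) := by
  intro l
  induction l with
  | nil =>
    intro fuel cur acc h
    cases fuel with
    | zero => omega
    | succ f =>
      rw [PySem.Chars.splitOn.go]
      · simp [splitC, List.modifyHead]
      · omega
  | cons a t ih =>
    intro fuel cur acc h
    cases fuel with
    | zero => omega
    | succ f =>
      rw [PySem.Chars.splitOn.go]
      by_cases hac : c = a
      · subst hac
        have hp : [c].isPrefixOf (c :: t) = true := by simp [List.isPrefixOf]
        simp only [hp, if_true, List.length_singleton, List.drop_one, List.tail_cons]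
        rw [ih f [] (cur.reverse :: acc) (by simpa using h)]
        simp only [splitC, if_pos rfl]
        cases splitC c t <;> simp [List.modifyHead]
      · have hp : [c].isPrefixOf (a :: t) = false := by
          simp only [List.isPrefixOf, Bool.and_true, beq_eq_false_iff_ne, ne_eq]
          exact hac
        simp only [hp, Bool.false_eq_true, if_false]
        rw [ih f (a :: cur) acc (by simpa using h)]
        have hne : a ≠ c := fun e => hac e.symm
        simp only [splitC, hne, if_false]
        cases hs : splitC c t with
        | nil => exact absurd hs (splitC_ne_nil c t)
        | cons x xs => simp [List.modifyHead]lemma splitOn_eq_splitC (c : Char) (l : List Char) :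
    PySem.Chars.splitOn l [c] = splitC c l := by
  unfold PySem.Chars.splitOn
  rw [splitOn_go_eq c l (l.length + 1) [] [] (by omega)]
  cases h : splitC c l with
  | nil => exact absurd h (splitC_ne_nil c l)
  | cons x xs => simp [List.modifyHead]

lemma splitOnMax_go_zero (c : Char) :
    ∀ (fuel : Nat) (l : List Char) (cur : List Char) (acc : List (List Char)),
      PySem.Chars.splitOnMax.go [c] fuel 0 l cur acc = acc.reverse ++ [cur.reverse ++ l] := by
  intro fuel l cur acc
  cases fuel with
  | zero => rw [PySem.Chars.splitOnMax.go]; simp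
  | succ f =>
    cases l with
    | nil =>
      rw [PySem.Chars.splitOnMax.go]
      · simp
      · omega
    | cons a t => rw [PySem.Chars.splitOnMax.go]; simp

lemma splitOnMax_go_one (c : Char) :
    ∀ (l : List Char) (fuel : Nat) (cur : List Char) (acc : List (List Char)),
      l.length < fuel → c ∈ l →
      PySem.Chars.splitOnMax.go [c] fuel 1 l cur acc =
        acc.reverse ++ [cur.reverse ++ l.takeWhile (fun a => a != c),
          l.drop ((l.takeWhile (fun a => a != c)).length + 1)] := by
  intro l
  induction l with
  | nil => intro fuel cur acc h hm; simp at hm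
  | cons a t ih =>
    intro fuel cur acc h hm
    cases fuel with
    | zero => omega
    | succ f =>
      rw [PySem.Chars.splitOnMax.go]
      by_cases hac : c = a
      · subst hac
        have hp : [c].isPrefixOf (c :: t) = true := by simp [List.isPrefixOf]
        simp only [hp, if_true, List.length_singleton, List.drop_one, List.tail_cons,
          if_neg (by omega : ¬ (1 : Nat) = 0)]
        rw [splitOnMax_go_zero]
        simp [List.takeWhile_cons]
      · have hne : a ≠ c := fun e => hac e.symm
        have hp : [c].isPrefixOf (a :: t) = false := by
          simp only [List.isPrefixOf, Bool.and_true, beq_eq_false_iff_ne, ne_eq]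
          exact hac
        have hmt : c ∈ t := by
          rcases List.mem_cons.mp hm with rfl | hmt
          · exact absurd rfl hne
          · exact hmt
        simp only [hp, Bool.false_eq_true, if_false, if_neg (by omega : ¬ (1 : Nat) = 0)]
        rw [ih f (a :: cur) acc (by simpa using h) hmt]
        simp [List.takeWhile_cons, hne, List.drop_succ_cons]lemma splitOnMax_one {c : Char} {l : List Char} (h : c ∈ l) :
    PySem.Chars.splitOnMax l [c] 1 =
      [l.takeWhile (fun a => a != c), l.drop ((l.takeWhile (fun a => a != c)).length + 1)] := by
  unfold PySem.Chars.splitOnMax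
  rw [if_neg (by omega : ¬ (1 : Int) < 0)]
  have h1 : (1 : Int).toNat = 1 := rfl
  rw [h1, splitOnMax_go_one c l (l.length + 1) [] [] (by omega) h]
  simp

lemma pkv_of_not_mem {p : List Char} (h : '=' ∉ p) (d : PySem.Dict String String) :
    pkv d p = d := by
  have hIn : PySem.Str.isIn "=" (String.ofList p) = false := by
    have : ("=" : String).toList = ['='] := rfl
    simp only [PySem.Str.isIn, String.toList_ofList, this]
    exact isIn_single_false.mpr h
  have hC : PySem.Chars.isIn ['='] p = false := isIn_single_false.mpr h
  simp [pkv, parseKV, hIn, hC]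

lemma pkv_of_mem {p : List Char} (h : '=' ∈ p) (d : PySem.Dict String String) :
    pkv d p = d.insert
      (String.ofList (PySem.Chars.strip (p.takeWhile (fun a => a != '='))))
      (String.ofList (PySem.Chars.strip (p.drop ((p.takeWhile (fun a => a != '=')).length + 1)))) := by
  have htl : ("=" : String).toList = ['='] := rfl
  have hIn : PySem.Str.isIn "=" (String.ofList p) = true := by
    simp only [PySem.Str.isIn, String.toList_ofList, htl]
    exact isIn_single.mpr h
  have hs : PySem.Str.splitMax? (String.ofList p) "=" 1 =
      some [String.ofList (p.takeWhile (fun a => a != '=')),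
            String.ofList (p.drop ((p.takeWhile (fun a => a != '=')).length + 1))] := by
    simp only [PySem.Str.splitMax?, String.toList_ofList, PySem.Chars.splitMax?, htl]
    rw [if_neg (by simp), splitOnMax_one h]
    rfl
  have hstr : ∀ q : List Char, PySem.Str.strip (String.ofList q) = String.ofList (PySem.Chars.strip q) := by
    intro q; simp [PySem.Str.strip, String.toList_ofList]
  simp only [pkv, parseKV, hIn, if_true, hs, hstr]

lemma takeWhile_append_all {q : Char → Bool} {w s : List Char} (h : ∀ a ∈ w, q a = true) :
    (w ++ s).takeWhile q = w ++ s.takeWhile q := by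
  induction w with
  | nil => rfl
  | cons a t ih =>
    have ha := h a (by simp)
    simp only [List.cons_append, List.takeWhile_cons, ha, if_true]
    rw [ih (fun x hx => h x (by simp [hx]))]

lemma dropWhile_append_all {q : Char → Bool} {w s : List Char} (h : ∀ a ∈ w, q a = true) :
    (w ++ s).dropWhile q = s.dropWhile q := by
  induction w with
  | nil => rfl
  | cons a t ih =>
    have ha := h a (by simp)
    simp only [List.cons_append, List.dropWhile_cons, ha, if_true]
    exact ih (fun x hx => h x (by simp [hx]))

lemma takeWhile_append_exists {q : Char → Bool} {p w : List Char} (h : ∃ x ∈ p, q x = false) :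
    (p ++ w).takeWhile q = p.takeWhile q := by
  induction p with
  | nil => obtain ⟨x, hx, _⟩ := h; simp at hx
  | cons a t ih =>
    by_cases ha : q a = true
    · simp only [List.cons_append, List.takeWhile_cons, ha, if_true]
      obtain ⟨x, hx, hqx⟩ := h
      rcases List.mem_cons.mp hx with rfl | hx
      · rw [ha] at hqx; cases hqx
      · rw [ih ⟨x, hx, hqx⟩]
    · have ha' : q a = false := by revert ha; cases q a <;> simp
      simp [List.takeWhile_cons, ha']

lemma dropWhile_append_exists {q : Char → Bool} {p w : List Char} (h : ∃ x ∈ p, q x = false) :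
    (p ++ w).dropWhile q = p.dropWhile q ++ w := by
  induction p with
  | nil => obtain ⟨x, hx, _⟩ := h; simp at hx
  | cons a t ih =>
    by_cases ha : q a = true
    · simp only [List.cons_append, List.dropWhile_cons, ha, if_true]
      obtain ⟨x, hx, hqx⟩ := h
      rcases List.mem_cons.mp hx with rfl | hx
      · rw [ha] at hqx; cases hqx
      · exact ih ⟨x, hx, hqx⟩
    · have ha' : q a = false := by revert ha; cases q a <;> simp
      simp [List.dropWhile_cons, ha']

lemma length_takeWhile_lt {c : Char} {p : List Char} (h : c ∈ p) :
    (p.takeWhile (fun a => a != c)).length < p.length := by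
  induction p with
  | nil => simp at h
  | cons a t ih =>
    rcases List.mem_cons.mp h with rfl | h
    · simp [List.takeWhile_cons]
    · by_cases hc : a = c
      · subst hc; simp [List.takeWhile_cons]
      · simp only [List.takeWhile_cons, bne_iff_ne, ne_eq, hc, not_false_eq_true, if_true]
        simpa using Nat.succ_lt_succ (ih h)

lemma isspace_eq : PySem.Chars.isspace '=' = false := by decide
lemma isspace_semi : PySem.Chars.isspace ';' = false := by decide

lemma strip_append_left {w : List Char} (hw : wsAll w) (s : List Char) :
    PySem.Chars.strip (w ++ s) = PySem.Chars.strip s := by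
  unfold PySem.Chars.strip PySem.Chars.lstrip
  rw [dropWhile_append_all hw]

lemma rstrip_append_right {w : List Char} (hw : wsAll w) (s : List Char) :
    PySem.Chars.rstrip (s ++ w) = PySem.Chars.rstrip s := by
  unfold PySem.Chars.rstrip
  rw [List.reverse_append, dropWhile_append_all (fun a ha => hw a (List.mem_reverse.mp ha))]

lemma strip_append_right {w : List Char} (hw : wsAll w) (s : List Char) :
    PySem.Chars.strip (s ++ w) = PySem.Chars.strip s := by
  by_cases hs : ∃ x ∈ s, PySem.Chars.isspace x = false
  · unfold PySem.Chars.strip PySem.Chars.lstrip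
    rw [dropWhile_append_exists hs]
    exact rstrip_append_right hw _
  · push_neg at hs
    have hall : ∀ x ∈ s, PySem.Chars.isspace x = true := by
      intro x hx
      have := hs x hx
      revert this; cases PySem.Chars.isspace x <;> simp
    have hnil : ∀ u, wsAll u → PySem.Chars.strip u = [] := by
      intro u hu
      unfold PySem.Chars.strip PySem.Chars.lstrip PySem.Chars.rstrip
      rw [List.dropWhile_eq_nil_iff.mpr hu]
      rfl
    rw [hnil _ (fun a ha => by
      rcases List.mem_append.mp ha with h | h
      · exact hall a h
      · exact hw a h), hnil _ hall]

lemma strip_decomp (p : List Char) :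
    ∃ w₁ w₂, wsAll w₁ ∧ wsAll w₂ ∧ p = w₁ ++ PySem.Chars.strip p ++ w₂ := by
  refine ⟨p.takeWhile PySem.Chars.isspace,
    ((PySem.Chars.lstrip p).reverse.takeWhile PySem.Chars.isspace).reverse, ?_, ?_, ?_⟩
  · intro a ha; exact List.mem_takeWhile_imp ha
  · intro a ha; exact List.mem_takeWhile_imp (List.mem_reverse.mp ha)
  · have h2 : PySem.Chars.lstrip p =
        PySem.Chars.strip p ++ ((PySem.Chars.lstrip p).reverse.takeWhile PySem.Chars.isspace).reverse := by
      unfold PySem.Chars.strip PySem.Chars.rstrip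
      conv_lhs => rw [← List.reverse_reverse (PySem.Chars.lstrip p),
        ← List.takeWhile_append_dropWhile (p := PySem.Chars.isspace)
          (l := (PySem.Chars.lstrip p).reverse)]
      rw [List.reverse_append]
    conv_lhs => rw [← List.takeWhile_append_dropWhile (p := PySem.Chars.isspace) (l := p)]
    rw [List.append_assoc, ← h2]
    rfl

lemma mem_strip_of_not_space {a : Char} {p : List Char} (ha : PySem.Chars.isspace a = false)
    (h : a ∈ p) : a ∈ PySem.Chars.strip p := by
  obtain ⟨w₁, w₂, h₁, h₂, hp⟩ := strip_decomp p
  rw [hp] at h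
  simp at h
  rcases h with h | h | h
  · exact absurd (h₁ a h) (by simp [ha])
  · exact h
  · exact absurd (h₂ a h) (by simp [ha])

lemma allspace_of_strip_nil {p : List Char} (h : PySem.Chars.strip p = []) : wsAll p := by
  obtain ⟨w₁, w₂, h₁, h₂, hp⟩ := strip_decomp p
  rw [hp, h]
  intro a ha
  simp at ha
  rcases ha with ha | ha
  · exact h₁ a ha
  · exact h₂ a ha

lemma pkv_append_left {w : List Char} (hw : wsAll w) (p : List Char)
    (d : PySem.Dict String String) : pkv d (w ++ p) = pkv d p := by
  have hwne : ∀ a ∈ w, (a != '=') = true := by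
    intro a ha
    have hsp := hw a ha
    simp only [bne_iff_ne, ne_eq]
    intro e; subst e; rw [isspace_eq] at hsp; cases hsp
  by_cases h : '=' ∈ p
  · rw [pkv_of_mem (List.mem_append_right w h), pkv_of_mem h]
    rw [takeWhile_append_all hwne, strip_append_left hw]
    have hdrop : List.drop ((w ++ p.takeWhile (fun a => a != '=')).length + 1) (w ++ p)
        = List.drop ((p.takeWhile (fun a => a != '=')).length + 1) p := by
      rw [List.drop_append, List.drop_eq_nil_of_le (by simp [List.length_append]; omega),
        List.nil_append]
      congr 1
      simp [List.length_append]
      omega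
    rw [hdrop]
  · rw [pkv_of_not_mem h]
    refine pkv_of_not_mem ?_ d
    intro hmem
    rcases List.mem_append.mp hmem with hm | hm
    · have := hwne '=' hm; simp at this
    · exact h hm

lemma pkv_append_right {w : List Char} (hw : wsAll w) (p : List Char)
    (d : PySem.Dict String String) : pkv d (p ++ w) = pkv d p := by
  have hwe : '=' ∉ w := by
    intro hm
    have := hw '=' hm; rw [isspace_eq] at this; cases this
  by_cases h : '=' ∈ p
  · have hq : (('=' : Char) != '=') = false := by simp
    rw [pkv_of_mem (List.mem_append_left w h), pkv_of_mem h]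
    rw [takeWhile_append_exists (q := fun a => a != '=') ⟨'=', h, hq⟩]
    congr 2
    rw [List.drop_append_of_le_length (by have := length_takeWhile_lt h; omega)]
    exact strip_append_right hw _
  · rw [pkv_of_not_mem h]
    refine pkv_of_not_mem ?_ d
    intro hmem
    rcases List.mem_append.mp hmem with hm | hm
    · exact h hm
    · exact hwe hm

lemma pkv_strip (p : List Char) (d : PySem.Dict String String) :
    pkv d (PySem.Chars.strip p) = pkv d p := by
  obtain ⟨w₁, w₂, h₁, h₂, hp⟩ := strip_decomp p
  conv_rhs => rw [hp]
  rw [List.append_assoc, pkv_append_left h₁, pkv_append_right h₂]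

lemma splitC_of_not_mem {c : Char} {l : List Char} (h : c ∉ l) : splitC c l = [l] := by
  induction l with
  | nil => rfl
  | cons a t ih =>
    have ha : a ≠ c := fun e => h (e ▸ List.mem_cons_self ..)
    have ht : c ∉ t := fun e => h (List.mem_cons_of_mem _ e)
    simp [splitC, ha, ih ht, List.modifyHead]

lemma splitC_append_left {c : Char} {w : List Char} (hw : c ∉ w) (r : List Char) :
    splitC c (w ++ r) = (splitC c r).modifyHead (w ++ ·) := by
  induction w with
  | nil => cases h : splitC c r <;> simp [List.modifyHead, h]
  | cons a t ih =>
    have ha : a ≠ c := fun e => hw (e ▸ List.mem_cons_self ..)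
    have ht : c ∉ t := fun e => hw (List.mem_cons_of_mem _ e)
    simp only [List.cons_append, splitC, ha, if_false, ih ht]
    cases h : splitC c r with
    | nil => exact absurd h (splitC_ne_nil c r)
    | cons x xs => simp [List.modifyHead]

lemma splitC_append_right {c : Char} {w : List Char} (hw : c ∉ w) (r : List Char) :
    splitC c (r ++ w) = mLast (· ++ w) (splitC c r) := by
  induction r with
  | nil => simp [splitC_of_not_mem hw, splitC, mLast]
  | cons a t ih =>
    simp only [List.cons_append, splitC]
    by_cases ha : a = c
    · subst ha
      simp only [if_true, ih]
      cases h : splitC a t with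
      | nil => exact absurd h (splitC_ne_nil a t)
      | cons x xs => simp [mLast]
    · simp only [ha, if_false, ih]
      cases h : splitC c t with
      | nil => exact absurd h (splitC_ne_nil c t)
      | cons x xs =>
        cases xs with
        | nil => simp [List.modifyHead, mLast]
        | cons y ys => simp [List.modifyHead, mLast]

lemma mem_splitC_subset {c : Char} {l q : List Char} (hq : q ∈ splitC c l) :
    ∀ a ∈ q, a ∈ l := by
  induction l generalizing q with
  | nil => intro a ha; simp [splitC] at hq; subst hq; simp at ha
  | cons b t ih =>
    intro a ha
    simp only [splitC] at hq
    by_cases hb : b = c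
    · subst hb; simp only [if_true] at hq
      rcases List.mem_cons.mp hq with rfl | hq
      · simp at ha
      · exact List.mem_cons_of_mem _ (ih hq a ha)
    · simp only [hb, if_false] at hq
      cases h : splitC c t with
      | nil => exact absurd h (splitC_ne_nil c t)
      | cons x xs =>
        rw [h] at hq
        simp only [List.modifyHead] at hq
        rcases List.mem_cons.mp hq with rfl | hq
        · rcases List.mem_cons.mp ha with rfl | ha
          · exact List.mem_cons_self ..
          · exact List.mem_cons_of_mem _ (ih (h ▸ List.mem_cons_self ..) a ha)
        · exact List.mem_cons_of_mem _ (ih (h ▸ List.mem_cons_of_mem _ hq) a ha)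

-- fold lemmas over pkv -------------------------------------------------------

lemma foldl_pkv_modifyHead {g : List Char → List Char}
    (hg : ∀ d x, pkv d (g x) = pkv d x) (xs : List (List Char))
    (d : PySem.Dict String String) :
    (xs.modifyHead g).foldl pkv d = xs.foldl pkv d := by
  cases xs with
  | nil => rfl
  | cons x t => simp [List.modifyHead, hg]

lemma foldl_pkv_modifyLast {g : List Char → List Char}
    (hg : ∀ d x, pkv d (g x) = pkv d x) (xs : List (List Char)) :
    ∀ d, (mLast g xs).foldl pkv d = xs.foldl pkv d := by
  induction xs with
  | nil => intro d; rfl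
  | cons x t ih =>
    intro d
    cases t with
    | nil => simp [mLast, hg]
    | cons y ts => simp only [mLast, List.foldl_cons]; exact ih (pkv d x)

lemma foldl_pkv_strip_filter (xs : List (List Char)) :
    ∀ d, ((xs.filter (fun p => PySem.Chars.strip p ≠ [])).map PySem.Chars.strip).foldl pkv d
      = xs.foldl pkv d := by
  induction xs with
  | nil => intro d; rfl
  | cons p t ih =>
    intro d
    by_cases h0 : PySem.Chars.strip p = []
    · have hne : '=' ∉ p := by
        intro hm
        have := allspace_of_strip_nil h0 '=' hm
        rw [isspace_eq] at this; cases this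
      simp only [List.filter_cons, h0, ne_eq, not_true_eq_false, decide_false,
        List.foldl_cons, pkv_of_not_mem hne]
      exact ih d
    · have hf : (decide ¬PySem.Chars.strip p = []) = true := by simp [h0]
      simp only [List.filter_cons, ne_eq, hf, if_true, List.map_cons, List.foldl_cons, pkv_strip]
      exact ih (pkv d p)

lemma foldl_pkv_no_eq : ∀ (xs : List (List Char)), (∀ q ∈ xs, '=' ∉ q) →
    ∀ (d : PySem.Dict String String), xs.foldl pkv d = d := by
  intro xs
  induction xs with
  | nil => intro _ _; rfl
  | cons p t ih =>
    intro h d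
    simp only [List.foldl_cons, pkv_of_not_mem (h p (List.mem_cons_self ..))]
    exact ih (fun q hq => h q (List.mem_cons_of_mem _ hq)) d

-- the per-line equality ------------------------------------------------------

lemma line_stepC (L : List Char) (d : PySem.Dict String String) :
    (if PySem.Chars.strip L = [] then ([] : List (List Char))
     else if ';' ∈ PySem.Chars.strip L ∧ '=' ∈ PySem.Chars.strip L then
       ((splitC ';' (PySem.Chars.strip L)).filter
          (fun p => PySem.Chars.strip p ≠ [])).map PySem.Chars.strip
     else [PySem.Chars.strip L]).foldl pkv d
      = (splitC ';' L).foldl pkv d := by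
  by_cases h0 : PySem.Chars.strip L = []
  · rw [if_pos h0]
    have hws : wsAll L := allspace_of_strip_nil h0
    symm
    refine foldl_pkv_no_eq _ ?_ d
    intro q hq hm
    have h1 := hws '=' (mem_splitC_subset hq '=' hm)
    rw [isspace_eq] at h1; cases h1
  · rw [if_neg h0]
    obtain ⟨w₁, w₂, h₁, h₂, hL⟩ := strip_decomp L
    have hw1s : ';' ∉ w₁ := fun hm => by
      have := h₁ ';' hm; rw [isspace_semi] at this; cases this
    have hw2s : ';' ∉ w₂ := fun hm => by
      have := h₂ ';' hm; rw [isspace_semi] at this; cases this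
    by_cases h1 : ';' ∈ PySem.Chars.strip L ∧ '=' ∈ PySem.Chars.strip L
    · rw [if_pos h1, foldl_pkv_strip_filter]
      conv_rhs => rw [hL, List.append_assoc]
      rw [splitC_append_left hw1s, splitC_append_right hw2s]
      rw [foldl_pkv_modifyHead (fun d x => pkv_append_left h₁ x d)]
      rw [foldl_pkv_modifyLast (fun d x => pkv_append_right h₂ x d)]
    · rw [if_neg h1]
      by_cases he : '=' ∈ PySem.Chars.strip L
      · have hsc : ';' ∉ PySem.Chars.strip L := fun hm => h1 ⟨hm, he⟩
        have hscL : ';' ∉ L := fun hm => hsc (mem_strip_of_not_space isspace_semi hm)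
        rw [splitC_of_not_mem hscL]
        simp only [List.foldl_cons, List.foldl_nil]
        rw [pkv_strip]
      · have heL : '=' ∉ L := fun hm => he (mem_strip_of_not_space isspace_eq hm)
        simp only [List.foldl_cons, List.foldl_nil]
        rw [pkv_of_not_mem he]
        symm
        refine foldl_pkv_no_eq _ ?_ d
        intro q hq hm
        exact heL (mem_splitC_subset hq '=' hm)

lemma foldl_parseKV_ofList (xs : List (List Char)) (d : PySem.Dict String String) :
    (xs.map String.ofList).foldl parseKV d = xs.foldl pkv d := by
  rw [List.foldl_map]
  rfl

lemma line_step (line : String) (d : PySem.Dict String String) :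
    (let l := PySem.Str.strip line
     if l = "" then ([] : List String)
     else if PySem.Str.isIn ";" l && PySem.Str.isIn "=" l then
       ((((PySem.Chars.splitOn l.toList [';']).map String.ofList).filter
           (fun p => PySem.Str.strip p ≠ "")).map PySem.Str.strip)
     else [l]).foldl parseKV d
      = ((PySem.Chars.splitOn line.toList [';']).map String.ofList).foldl parseKV d := by
  have hofl : ∀ q, PySem.Str.strip (String.ofList q) = String.ofList (PySem.Chars.strip q) := by
    intro q; simp [PySem.Str.strip, String.toList_ofList]
  have hstripl : PySem.Str.strip line = String.ofList (PySem.Chars.strip line.toList) := by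
    simp [PySem.Str.strip]
  have hempty : (PySem.Str.strip line = "") ↔ PySem.Chars.strip line.toList = [] := by
    rw [hstripl, show ("" : String) = String.ofList [] from rfl, String.ofList_inj]
  have hsemi : ((";" : String)).toList = [';'] := rfl
  have heqs : (("=" : String)).toList = ['='] := rfl
  have hIn : ∀ (a : Char) (t : String), PySem.Str.isIn (String.ofList [a]) t = true ↔ a ∈ t.toList := by
    intro a t
    simp only [PySem.Str.isIn, String.toList_ofList]
    exact isIn_single
  show (if PySem.Str.strip line = "" then ([] : List String)
     else if PySem.Str.isIn ";" (PySem.Str.strip line) && PySem.Str.isIn "=" (PySem.Str.strip line) then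
       ((((PySem.Chars.splitOn (PySem.Str.strip line).toList [';']).map String.ofList).filter
           (fun p => PySem.Str.strip p ≠ "")).map PySem.Str.strip)
     else [PySem.Str.strip line]).foldl parseKV d
      = ((PySem.Chars.splitOn line.toList [';']).map String.ofList).foldl parseKV d
  have hcond : (PySem.Str.isIn ";" (PySem.Str.strip line) && PySem.Str.isIn "=" (PySem.Str.strip line)) = true
      ↔ (';' ∈ PySem.Chars.strip line.toList ∧ '=' ∈ PySem.Chars.strip line.toList) := by
    rw [Bool.and_eq_true]
    rw [show (";" : String) = String.ofList [';'] from rfl, show ("=" : String) = String.ofList ['='] from rfl]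
    rw [hIn, hIn, hstripl, String.toList_ofList]
  have hmapstrip :
      ((((PySem.Chars.splitOn (PySem.Str.strip line).toList [';']).map String.ofList).filter
           (fun p => PySem.Str.strip p ≠ "")).map PySem.Str.strip)
      = (((splitC ';' (PySem.Chars.strip line.toList)).filter
          (fun p => PySem.Chars.strip p ≠ [])).map PySem.Chars.strip).map String.ofList := by
    rw [hstripl, String.toList_ofList, splitOn_eq_splitC, List.filter_map, List.map_map, List.map_map]
    congr 1
    · funext q
      simp [Function.comp_apply, hofl]
    · apply List.filter_congr
      intro q _
      simp only [Function.comp_apply, hofl, ne_eq, decide_eq_decide]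
      rw [show ("" : String) = String.ofList [] from rfl, String.ofList_inj]
  rw [splitOn_eq_splitC (l := line.toList), foldl_parseKV_ofList, ← line_stepC line.toList d]
  by_cases h0 : PySem.Chars.strip line.toList = []
  · rw [if_pos (hempty.mpr h0), if_pos h0]; rfl
  · rw [if_neg (fun e => h0 (hempty.mp e)), if_neg h0]
    by_cases h1 : ';' ∈ PySem.Chars.strip line.toList ∧ '=' ∈ PySem.Chars.strip line.toList
    · rw [if_pos (hcond.mpr h1), if_pos h1, hmapstrip, foldl_parseKV_ofList]
    · rw [if_neg (fun e => h1 (hcond.mp e)), if_neg h1, hstripl]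
      exact foldl_parseKV_ofList [_] d

lemma foldl_parts {α β : Type} (g : β → List α) (f : PySem.Dict String String → α → PySem.Dict String String)
    (lines : List β) :
    ∀ (init : List α) (d : PySem.Dict String String),
      (lines.foldl (fun ps l => ps ++ g l) init).foldl f d
        = lines.foldl (fun d l => (g l).foldl f d) (init.foldl f d) := by
  induction lines with
  | nil => intro init d; rfl
  | cons a t ih => intro init d; simp only [List.foldl_cons, ih, List.foldl_append]

lemma main_eq (sig : String) : signals_to_dict_py sig = signals_to_dict_py_alt sig := by
  by_cases h : sig = ""
  · subst h; rfl
  · unfold signals_to_dict_py signals_to_dict_py_alt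
    rw [if_neg h]
    have hbody : (fun (parts : List String) (line : String) =>
        let line := PySem.Str.strip line
        if line = "" then parts
        else if PySem.Str.isIn ";" line && PySem.Str.isIn "=" line then
          parts ++ ((((PySem.Chars.splitOn line.toList [';']).map String.ofList).filter
                      (fun p => PySem.Str.strip p ≠ "")).map PySem.Str.strip)
        else parts ++ [line])
      = (fun parts line => parts ++
          (let l := PySem.Str.strip line
           if l = "" then ([] : List String)
           else if PySem.Str.isIn ";" l && PySem.Str.isIn "=" l then
             ((((PySem.Chars.splitOn l.toList [';']).map String.ofList).filter
                 (fun p => PySem.Str.strip p ≠ "")).map PySem.Str.strip)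
           else [l])) := by
      funext parts line
      dsimp only
      split_ifs <;> simp
    rw [hbody]
    dsimp only
    congr 1
    rw [foldl_parts]
    have hfun : (fun (d : PySem.Dict String String) (line : String) =>
        (let l := PySem.Str.strip line
         if l = "" then ([] : List String)
         else if PySem.Str.isIn ";" l && PySem.Str.isIn "=" l then
           ((((PySem.Chars.splitOn l.toList [';']).map String.ofList).filter
               (fun p => PySem.Str.strip p ≠ "")).map PySem.Str.strip)
         else [l]).foldl parseKV d)
      = (fun out line => ((PySem.Chars.splitOn line.toList [';']).map String.ofList).foldl parseKV out) := by
      funext d line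
      exact line_step line d
    rw [hfun]
    rfl

-- ===== VERDICT (by name: the statement is the Claim_ definition above) =====
theorem signals_to_dict_py_spec : Claim_equal_signals_to_dict_py := by
  intro sig _
  unfold Spec_signals_to_dict_py
  exact main_eq sig
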